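-- pv_equiv track=rewrite | github.com/th-ch/adventofcode-2023 | day-03/part-1/david.py | _scan_line
-- ===== SOURCE A (Python) =====
-- from typing import Iterator
--
-- def _scan_line(line: str) -> Iterator[tuple[int, int]]:
--     start, end = None, None
--     for i in range(len(line)):
--         if not line[i].isdigit():
--             if start is not None:
--                 end = i
--                 yield (start, end)
--                 start = None
--         else:
--             if start is None:
--                 start = i
--     if start is not None:
--         end = len(line)
--         yield (start, end)
-- ===== SOURCE B (Python) =====
-- from itertools import groupby
-- from typing import Iterator
--
-- def _scan_line(line: str) -> Iterator[tuple[int, int]]: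
--     start = 0
--     for is_digit, group in groupby(line, key=lambda c: c.isdigit()):
--         length = sum(1 for _ in group)
--         if is_digit:
--             yield (start, start + length)
--         start += length
-- ===== Notes on version B (the rewrite author's own statement) =====
-- stated objective: idiomatic
-- what changed: Replaced the explicit start/end sentinel state machine with a trailing-flush branch by itertools.groupby over c.isdigit(): each digit group yields (start, start+length) while a running index advances by every group's length.
import Mathlib
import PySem

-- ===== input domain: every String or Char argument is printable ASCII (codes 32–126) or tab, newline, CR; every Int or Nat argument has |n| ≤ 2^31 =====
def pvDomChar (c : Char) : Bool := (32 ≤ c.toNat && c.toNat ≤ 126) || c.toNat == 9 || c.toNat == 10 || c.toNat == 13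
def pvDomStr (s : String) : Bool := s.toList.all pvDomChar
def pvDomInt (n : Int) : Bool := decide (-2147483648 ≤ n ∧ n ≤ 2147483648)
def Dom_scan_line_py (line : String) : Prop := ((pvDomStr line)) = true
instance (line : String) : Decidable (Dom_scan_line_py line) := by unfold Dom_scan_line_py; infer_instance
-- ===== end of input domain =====

-- B replaces A's start/end sentinel state machine (with trailing flush) by an
-- itertools.groupby-style grouping of consecutive equal-isdigit runs (objective: idiomatic).
-- Both are generators; equivalence is about the list of yielded pairs.

-- ===== PORT A =====
-- A's loop over range(len(line)) with state (start : Option); the generator's yields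
-- become list conses; the final 'if start is not None: yield (start, len(line))' is the
-- base case (where i = len(line)).
def pvGoA : List Char → Int → Option Int → List (Int × Int)
  | [], i, start =>
      match start with
      | some s => [(s, i)]
      | none => []
  | c :: cs, i, start =>
      if !(PySem.Chars.isdigit c) then
        match start with
        | some s => (s, i) :: pvGoA cs (i + 1) none
        | none => pvGoA cs (i + 1) none
      else
        match start with
        | none => pvGoA cs (i + 1) (some i)
        | some _ => pvGoA cs (i + 1) start

def scan_line_py (line : String) : List (Int × Int) :=
  pvGoA line.toList 0 none

-- ===== PORT B =====
-- B's groupby: take the maximal run of chars with the same isdigit key as the head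
-- (the group), emit (start, start+length) when the key is True, advance start by length.
def pvGoB : List Char → Int → List (Int × Int)
  | [], _ => []
  | c :: cs, start =>
      let k := PySem.Chars.isdigit c
      let grp := cs.takeWhile (fun d => PySem.Chars.isdigit d == k)
      let rest := cs.dropWhile (fun d => PySem.Chars.isdigit d == k)
      let n : Int := (grp.length : Int) + 1
      if k then (start, start + n) :: pvGoB rest (start + n)
      else pvGoB rest (start + n)
  termination_by l _ => l.length
  decreasing_by
    all_goals
      have := List.length_dropWhile_le (fun d => PySem.Chars.isdigit d == PySem.Chars.isdigit c) cs
      simp only [List.length_cons]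
      omega

def scan_line_py_alt (line : String) : List (Int × Int) :=
  pvGoB line.toList 0

-- ===== PRECONDITION & SPEC =====
def Spec_scan_line_py (line : String) (out : List (Int × Int)) : Prop := out = scan_line_py_alt line
instance (line : String) (out : List (Int × Int)) : Decidable (Spec_scan_line_py line out) := by unfold Spec_scan_line_py; infer_instance

-- ===== CLAIM (what is proved, stated in full; the proofs are below) =====
def Claim_equal_scan_line_py : Prop := ∀ (line : String), Dom_scan_line_py line → Spec_scan_line_py line (scan_line_py line)

-- ===== LEMMAS AND PROOFS =====

-- Inside a digit run, A emits (s, i + length-of-remaining-run) and continues after it.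
theorem pvGoA_run (l : List Char) : ∀ (i s : Int),
    pvGoA l i (some s) =
      (s, i + ((l.takeWhile PySem.Chars.isdigit).length : Int)) ::
        pvGoA (l.dropWhile PySem.Chars.isdigit) (i + ((l.takeWhile PySem.Chars.isdigit).length : Int)) none := by
  induction l with
  | nil => intro i s; simp [pvGoA]
  | cons c cs ih =>
      intro i s
      by_cases h : PySem.Chars.isdigit c
      · simp only [pvGoA, h, List.takeWhile_cons, List.dropWhile_cons, Bool.not_true,
          Bool.false_eq_true, if_false, if_pos]
        rw [ih (i + 1) s]
        congr 2 <;> (simp only [List.length_cons]; push_cast; ring)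
      · simp [pvGoA, h]

-- Skipping a block of non-digits with no open run just advances the index.
theorem pvGoA_skip (g : List Char) : ∀ (r : List Char) (i : Int),
    (∀ d ∈ g, PySem.Chars.isdigit d = false) →
    pvGoA (g ++ r) i none = pvGoA r (i + (g.length : Int)) none := by
  induction g with
  | nil => intro r i _; simp
  | cons d g' ih =>
      intro r i hall
      have hd : PySem.Chars.isdigit d = false := hall d (by simp)
      have hg' : ∀ x ∈ g', PySem.Chars.isdigit x = false := fun x hx => hall x (by simp [hx])
      simp only [List.cons_append, pvGoA, hd, Bool.not_false, if_true]
      rw [ih r (i + 1) hg']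
      congr 1
      simp only [List.length_cons]; push_cast; ring

theorem pvGoA_eq_pvGoB (n : Nat) : ∀ (l : List Char), l.length ≤ n → ∀ (i : Int),
    pvGoA l i none = pvGoB l i := by
  induction n with
  | zero =>
      intro l hl i
      have : l = [] := List.eq_nil_of_length_eq_zero (Nat.le_zero.mp hl)
      subst this; simp [pvGoA, pvGoB]
  | succ n ih =>
      intro l hl i
      cases l with
      | nil => simp [pvGoA, pvGoB]
      | cons c cs =>
        by_cases h : PySem.Chars.isdigit c
        · -- digit group
          have hpred : (fun d => PySem.Chars.isdigit d == true) = PySem.Chars.isdigit := by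
            funext d; cases PySem.Chars.isdigit d <;> rfl
          simp only [pvGoA, h, Bool.not_true, Bool.false_eq_true, if_false]
          rw [pvGoA_run]
          have hrest : (cs.dropWhile PySem.Chars.isdigit).length ≤ n := by
            have := List.length_dropWhile_le PySem.Chars.isdigit cs
            simp only [List.length_cons] at hl; omega
          rw [ih _ hrest]
          simp only [pvGoB, h, if_true, hpred]
          have harith : i + 1 + ((cs.takeWhile PySem.Chars.isdigit).length : Int)
              = i + (((cs.takeWhile PySem.Chars.isdigit).length : Int) + 1) := by ring
          rw [harith]
        · -- non-digit group: skip it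
          have hc : PySem.Chars.isdigit c = false := by simpa using h
          have hpred : (fun d => PySem.Chars.isdigit d == false)
              = (fun d => !PySem.Chars.isdigit d) := by
            funext d; cases PySem.Chars.isdigit d <;> rfl
          simp only [pvGoA, hc, Bool.not_false, if_true]
          have hsplit : cs = cs.takeWhile (fun d => !PySem.Chars.isdigit d)
              ++ cs.dropWhile (fun d => !PySem.Chars.isdigit d) := (List.takeWhile_append_dropWhile).symm
          have hall : ∀ d ∈ cs.takeWhile (fun d => !PySem.Chars.isdigit d),
              PySem.Chars.isdigit d = false := by
            intro d hd
            have := List.mem_takeWhile_imp hd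
            simpa using this
          conv_lhs => rw [hsplit]
          rw [pvGoA_skip _ _ _ hall]
          have hrest : (cs.dropWhile (fun d => !PySem.Chars.isdigit d)).length ≤ n := by
            have := List.length_dropWhile_le (fun d => !PySem.Chars.isdigit d) cs
            simp only [List.length_cons] at hl; omega
          rw [ih _ hrest]
          simp only [pvGoB, hc, Bool.false_eq_true, if_false, hpred]
          have harith : i + 1 + ((cs.takeWhile (fun d => !PySem.Chars.isdigit d)).length : Int)
              = i + (((cs.takeWhile (fun d => !PySem.Chars.isdigit d)).length : Int) + 1) := by ring
          rw [harith]

-- ===== VERDICT (by name: the statement is the Claim_ definition above) =====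
theorem scan_line_py_spec : Claim_equal_scan_line_py := by
  intro line _
  unfold Spec_scan_line_py scan_line_py scan_line_py_alt
  exact pvGoA_eq_pvGoB line.toList.length line.toList le_rfl 0
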